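-- pv_equiv track=rewrite | github.com/Babson-Python-Spring2026/python-soren-spring2026 | classes/03-04 W/Homework_class13.py | standard_form
-- ===== SOURCE A (Python) =====
-- def to_grid(flat_board: list[str]) -> list[list[str]]:
--     ''' changes the board from a flat list of 9 cells into a 3x3 nested list.
--     this makes it easier to rotate or flip the board when checking symmetry.
--     the function returns a new grid without changing the original list. '''
--     grid = []
--     for row in range(3):
--         row_vals = []
--         for col in range(3):
--             row_vals.append(flat_board[row * 3 + col])
--         grid.append(row_vals)
--     return grid
--
-- def rotate_clockwise(grid: list[list[str]]) -> list[list[str]]: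
--     ''' Returns a new 3x3 grid that is the input grid rotated 90 degrees clockwise.
--     This is used when generating all symmetric versions of the board. '''
--     rotated = [[' '] * 3 for _ in range(3)]
--     for r in range(3):
--         for c in range(3):
--             rotated[c][2 - r] = grid[r][c]
--     return rotated
--
-- def flip_vertical(grid: list[list[str]]) -> list[list[str]]:
--     ''' Returns a vertically flipped version of the grid by swapping the top and bottom rows.
--     This creates a reflected form of the board for symmetry checking. '''
--     return [grid[2], grid[1], grid[0]]
--
-- def standard_form(flat_board: list[str]) -> list[list[str]]:
--     ''' Computes a 'standard' representation of the board under symmetry.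
--     It generates the 4 rotations of the board and the 4 rotations of its vertical flip,
--     then returns the smallest one so symmetry-equivalent boards have the same representation. '''
--     grid = to_grid(flat_board)
--     flipped = flip_vertical(grid)
--
--     variants = []
--     for _ in range(4):
--         variants.append(grid)
--         variants.append(flipped)
--         grid = rotate_clockwise(grid)
--         flipped = rotate_clockwise(flipped)
--
--     return min(variants)
-- ===== SOURCE B (Python) =====
-- # Table-driven: the 8 D4 index permutations applied to the flat board, then min.
-- _PERMS = [
--     (0, 1, 2, 3, 4, 5, 6, 7, 8),  # identity
--     (6, 7, 8, 3, 4, 5, 0, 1, 2),  # vertical flip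
--     (6, 3, 0, 7, 4, 1, 8, 5, 2),  # rot 90
--     (0, 3, 6, 1, 4, 7, 2, 5, 8),  # rot 90 of flip (transpose)
--     (8, 7, 6, 5, 4, 3, 2, 1, 0),  # rot 180
--     (2, 1, 0, 5, 4, 3, 8, 7, 6),  # rot 180 of flip
--     (2, 5, 8, 1, 4, 7, 0, 3, 6),  # rot 270
--     (8, 5, 2, 7, 4, 1, 6, 3, 0),  # rot 270 of flip
-- ]
--
-- def standard_form(flat_board: list[str]) -> list[list[str]]:
--     return min(
--         [[flat_board[p[3 * r + c]] for c in range(3)] for r in range(3)]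
--         for p in _PERMS
--     )
-- ===== Notes on version B (the rewrite author's own statement) =====
-- stated objective: simpler
-- what changed: Replaced the to_grid/rotate_clockwise/flip_vertical helpers and the incremental-rotation loop by a fixed table of the 8 D4 index permutations over positions 0..8, reading each symmetric grid directly from the flat board and taking min of the 8 grids.
import Mathlib
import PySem

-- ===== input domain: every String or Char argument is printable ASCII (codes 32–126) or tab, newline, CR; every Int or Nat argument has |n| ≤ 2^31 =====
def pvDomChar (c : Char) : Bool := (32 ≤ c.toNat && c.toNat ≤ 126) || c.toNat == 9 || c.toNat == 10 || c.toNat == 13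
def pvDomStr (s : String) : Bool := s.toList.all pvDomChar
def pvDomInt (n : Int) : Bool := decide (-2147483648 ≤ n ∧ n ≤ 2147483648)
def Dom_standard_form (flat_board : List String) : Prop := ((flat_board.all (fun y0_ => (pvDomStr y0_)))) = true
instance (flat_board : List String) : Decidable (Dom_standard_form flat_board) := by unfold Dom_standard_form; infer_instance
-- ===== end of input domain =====

-- B replaces A's rotate/flip helpers and rotation loop by a fixed table of the 8 D4 index
-- permutations and takes min of the 8 grids read through them (objective: simpler).

-- ===== PORT A =====
-- Helpers of A, transliterated. Indexing flat_board[row*3+col] uses pyGetD; it is exact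
-- under Pre_standard_form (9 ≤ length), which excludes exactly the IndexError inputs.
def pv_to_grid (flat_board : List String) : List (List String) :=
  (List.range 3).foldl (fun grid row =>
    grid ++ [ (List.range 3).foldl (fun row_vals col =>
      row_vals ++ [PySem.List.pyGetD flat_board ((row * 3 + col : Nat) : Int) ""]) [] ]) []

-- grid[r][c] read; grids here are always 3x3 so the default is never hit
def pv_gget (grid : List (List String)) (r c : Nat) : String :=
  (grid.getD r []).getD c ""

def pv_rotate_clockwise (grid : List (List String)) : List (List String) :=
  (List.range 3).foldl (fun rotated r =>
    (List.range 3).foldl (fun rotated c =>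
      rotated.set c ((rotated.getD c []).set (2 - r) (pv_gget grid r c))) rotated)
    (List.replicate 3 (List.replicate 3 " "))

def pv_flip_vertical (grid : List (List String)) : List (List String) :=
  [grid.getD 2 [], grid.getD 1 [], grid.getD 0 []]

def standard_form (flat_board : List String) : List (List String) :=
  let grid := pv_to_grid flat_board
  let flipped := pv_flip_vertical grid
  let st := (List.range 4).foldl
    (fun (st : List (List (List String)) × List (List String) × List (List String)) _ =>
      (st.1 ++ [st.2.1, st.2.2], pv_rotate_clockwise st.2.1, pv_rotate_clockwise st.2.2))
    ([], grid, flipped)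
  (PySem.List.min? st.1 (fun x => x)).getD []

-- ===== PORT B =====
def pv_PERMS : List (List Nat) :=
  [[0, 1, 2, 3, 4, 5, 6, 7, 8],
   [6, 7, 8, 3, 4, 5, 0, 1, 2],
   [6, 3, 0, 7, 4, 1, 8, 5, 2],
   [0, 3, 6, 1, 4, 7, 2, 5, 8],
   [8, 7, 6, 5, 4, 3, 2, 1, 0],
   [2, 1, 0, 5, 4, 3, 8, 7, 6],
   [2, 5, 8, 1, 4, 7, 0, 3, 6],
   [8, 5, 2, 7, 4, 1, 6, 3, 0]]

def standard_form_alt (flat_board : List String) : List (List String) :=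
  (PySem.List.min?
    (pv_PERMS.map (fun p =>
      (List.range 3).map (fun r =>
        (List.range 3).map (fun c =>
          PySem.List.pyGetD flat_board ((p.getD (3 * r + c) 0 : Nat) : Int) ""))))
    (fun x => x)).getD []

-- ===== PRECONDITION & SPEC =====
-- Both Pythons raise IndexError when the board has fewer than 9 cells; Pre_ excludes exactly those.
def Pre_standard_form (flat_board : List String) : Prop := 9 ≤ flat_board.length
instance (flat_board : List String) : Decidable (Pre_standard_form flat_board) := by
  unfold Pre_standard_form; infer_instance

def pvWitness_standard_form : List String := ["X", "O", " ", " ", "X", "O", "O", " ", "X"]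

def Spec_standard_form (flat_board : List String) (out : List (List String)) : Prop :=
  out = standard_form_alt flat_board
instance (flat_board : List String) (out : List (List String)) : Decidable (Spec_standard_form flat_board out) := by
  unfold Spec_standard_form; infer_instance

-- ===== CLAIM (what is proved, stated in full; the proofs are below) =====
def Claim_equal_standard_form : Prop := ∀ (flat_board : List String), Dom_standard_form flat_board → Pre_standard_form flat_board → Spec_standard_form flat_board (standard_form flat_board)

-- ===== LEMMAS AND PROOFS =====

-- ===== VERDICT (by name: the statement is the Claim_ definition above) =====
theorem standard_form_spec : Claim_equal_standard_form := by
  intro fb _ hpre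
  unfold Pre_standard_form at hpre
  obtain ⟨a, b, c, d, e, f, g, h, i, t, rfl⟩ :
      ∃ a b c d e f g h i t, fb = a :: b :: c :: d :: e :: f :: g :: h :: i :: t := by
    match fb, hpre with
    | a :: b :: c :: d :: e :: f :: g :: h :: i :: t, _ =>
      exact ⟨a, b, c, d, e, f, g, h, i, t, rfl⟩
  show Spec_standard_form _ _
  unfold Spec_standard_form standard_form standard_form_alt pv_to_grid pv_flip_vertical
    pv_rotate_clockwise pv_gget pv_PERMS
  simp [List.range_succ, List.getD]
  simp only [show (1:Int)=((1:Nat):Int) by norm_num, show (2:Int)=((2:Nat):Int) by norm_num, show (3:Int)=((3:Nat):Int) by norm_num, show (4:Int)=((4:Nat):Int) by norm_num, show (5:Int)=((5:Nat):Int) by norm_num, show (6:Int)=((6:Nat):Int) by norm_num, show (7:Int)=((7:Nat):Int) by norm_num, show (8:Int)=((8:Nat):Int) by norm_num, PySem.List.pyGetD_natCast]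
  rfl
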